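-- pv_equiv track=rewrite | github.com/AUT-Student/IR-SearchEngine | search_engine.py | _get_smallest_doc_id
-- ===== SOURCE A (Python) =====
-- def _get_smallest_doc_id(doc_id_list, pointer_list):
--     smallest_doc_id = 1000 * 1000 * 1000
--     smallest_doc_id_number = 0
--     for i, pointer in enumerate(pointer_list):
--         if pointer < len(doc_id_list[i]):
--             doc_id = doc_id_list[i][pointer]
--             if doc_id < smallest_doc_id:
--                 smallest_doc_id = doc_id
--                 smallest_doc_id_number = 1
--             elif doc_id == smallest_doc_id:
--                 smallest_doc_id_number += 1
--
--     return smallest_doc_id, smallest_doc_id_number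
-- ===== SOURCE B (Python) =====
-- def _get_smallest_doc_id(doc_id_list, pointer_list):
--     # Frequency table: one pass builds a dict of multiplicities of the valid
--     # doc_ids (seeded with the 10**9 sentinel at count 0), then the answer is
--     # the smallest key and its stored count.
--     counts = {10 ** 9: 0}
--     for row, pointer in zip(doc_id_list, pointer_list):
--         if pointer < len(row):
--             doc_id = row[pointer]
--             counts[doc_id] = counts.get(doc_id, 0) + 1
--     m = min(counts)
--     return m, counts[m]
-- ===== Notes on version B (the rewrite author's own statement) =====
-- stated objective: alternative
-- what changed: Replaces A's interleaved running-min-and-count state machine with a frequency-dictionary: one pass over zip(doc_id_list, pointer_list) builds a dict of multiplicities seeded with the 10**9 sentinel, then the result is min(counts) and its stored count.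
import Mathlib
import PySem

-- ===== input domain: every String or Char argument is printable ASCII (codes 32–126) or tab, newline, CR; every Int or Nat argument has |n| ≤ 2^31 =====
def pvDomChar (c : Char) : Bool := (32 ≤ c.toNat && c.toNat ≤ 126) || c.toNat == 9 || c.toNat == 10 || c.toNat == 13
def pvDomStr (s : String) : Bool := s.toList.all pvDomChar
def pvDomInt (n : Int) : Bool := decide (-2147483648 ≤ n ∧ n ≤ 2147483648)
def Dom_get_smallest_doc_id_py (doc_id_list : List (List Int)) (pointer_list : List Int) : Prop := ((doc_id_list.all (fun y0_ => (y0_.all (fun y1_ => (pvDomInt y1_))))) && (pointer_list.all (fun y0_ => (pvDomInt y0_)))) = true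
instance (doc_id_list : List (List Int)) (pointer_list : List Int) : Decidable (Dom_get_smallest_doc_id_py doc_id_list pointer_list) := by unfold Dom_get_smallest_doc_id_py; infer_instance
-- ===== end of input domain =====

-- B replaces A's interleaved running-min-and-count loop with a frequency dictionary
-- (one pass builds counts of the valid doc_ids seeded with the 10**9 sentinel, then min(counts)
-- and its stored count): a different data structure, same cost.


-- ===== PORT A =====
def get_smallest_doc_id_py (doc_id_list : List (List Int)) (pointer_list : List Int) : Int × Int :=
  (PySem.List.enumerate pointer_list 0).foldl
    (fun st ip =>
      let row := (PySem.List.pyGet? doc_id_list ip.1).getD []   -- doc_id_list[i]; none (IndexError) excluded by Pre_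
      if ip.2 < (row.length : Int) then
        let doc := (PySem.List.pyGet? row ip.2).getD 0           -- doc_id_list[i][pointer]; none excluded by Pre_
        if doc < st.1 then (doc, 1)
        else if doc = st.1 then (st.1, st.2 + 1)
        else st
      else st)
    (1000000000, 0)

-- ===== PORT B =====
def get_smallest_doc_id_py_alt (doc_id_list : List (List Int)) (pointer_list : List Int) : Int × Int :=
  let counts := (doc_id_list.zip pointer_list).foldl
    (fun d rp =>
      if rp.2 < (rp.1.length : Int) then
        let v := (PySem.List.pyGet? rp.1 rp.2).getD 0            -- row[pointer]; none excluded by Pre_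
        d.insert v (d.getD v 0 + 1)                               -- counts[v] = counts.get(v, 0) + 1
      else d)
    (PySem.Dict.insert PySem.Dict.empty (1000000000 : Int) (0 : Int))  -- {10**9: 0}
  let m := (PySem.List.min? counts.keys (fun x => x)).getD 0      -- min(counts); keys nonempty (sentinel)
  (m, (counts.get? m).getD 0)                                     -- counts[m]; m is always a key

-- ===== PRECONDITION & SPEC =====
-- Pre_ excludes exactly the inputs where A raises IndexError: a pointer_list longer than
-- doc_id_list, or a negative pointer below -len(doc_id_list[i]) for its row.
def Pre_get_smallest_doc_id_py (doc_id_list : List (List Int)) (pointer_list : List Int) : Prop :=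
  pointer_list.length ≤ doc_id_list.length ∧
  ∀ pr ∈ pointer_list.zip doc_id_list, -(pr.2.length : Int) ≤ pr.1
instance (doc_id_list : List (List Int)) (pointer_list : List Int) : Decidable (Pre_get_smallest_doc_id_py doc_id_list pointer_list) := by unfold Pre_get_smallest_doc_id_py; infer_instance

def pvWitness_get_smallest_doc_id_py : List (List Int) × List Int := ([[3, 1], [1, 7], [2]], [1, 0, 5])

def Spec_get_smallest_doc_id_py (doc_id_list : List (List Int)) (pointer_list : List Int) (out : Int × Int) : Prop := out = get_smallest_doc_id_py_alt doc_id_list pointer_list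
instance (doc_id_list : List (List Int)) (pointer_list : List Int) (out : Int × Int) : Decidable (Spec_get_smallest_doc_id_py doc_id_list pointer_list out) := by unfold Spec_get_smallest_doc_id_py; infer_instance

-- ===== CLAIM (what is proved, stated in full; the proofs are below) =====
def Claim_equal_get_smallest_doc_id_py : Prop := ∀ (doc_id_list : List (List Int)) (pointer_list : List Int), Dom_get_smallest_doc_id_py doc_id_list pointer_list → Pre_get_smallest_doc_id_py doc_id_list pointer_list → Spec_get_smallest_doc_id_py doc_id_list pointer_list (get_smallest_doc_id_py doc_id_list pointer_list)

-- ===== LEMMAS AND PROOFS =====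

-- A's loop body on one extracted value
def pvStepA (st : Int × Int) (v : Int) : Int × Int :=
  if v < st.1 then (v, 1) else if v = st.1 then (st.1, st.2 + 1) else st

-- A's interleaved state machine computes (running min, count of the running min)
theorem pvStepA_invariant (vs : List Int) :
    vs.foldl pvStepA ((1000000000 : Int), (0 : Int)) =
      (vs.foldl min 1000000000, (vs.count (vs.foldl min 1000000000) : Int)) := by
  induction vs using List.reverseRecOn with
  | nil => rfl
  | append_singleton t v ih =>
      have hmin := PySem.List.foldl_min_le t (1000000000 : Int)
      rw [List.foldl_append, List.foldl_append, ih]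
      simp only [List.foldl_cons, List.foldl_nil, pvStepA]
      by_cases h1 : v < t.foldl min 1000000000
      · have hnot : v ∉ t := fun hv => absurd (hmin.2 v hv) (by omega)
        have hc : t.count v = 0 := List.count_eq_zero.mpr hnot
        simp [h1, min_eq_right (le_of_lt h1), List.count_append, hc]
      · by_cases h2 : v = t.foldl min 1000000000
        · simp [h2, min_self, List.count_append]
        · have : min (t.foldl min 1000000000) v = t.foldl min 1000000000 := by
            apply min_eq_left; omega
          simp [h1, h2, this, List.count_append]

-- enumerate-then-index (A's traversal) yields the same (row, pointer) pairs as zip (B's traversal)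
theorem pv_extract_eq (dl : List (List Int)) (pl : List Int) (h : pl.length ≤ dl.length) :
    (PySem.List.enumerate pl 0).map
        (fun ip => ((PySem.List.pyGet? dl ip.1).getD [], ip.2)) = dl.zip pl := by
  apply List.ext_getElem?
  intro k
  simp only [List.getElem?_map]
  by_cases hk : k < pl.length
  · have hkd : k < dl.length := lt_of_lt_of_le hk h
    have he : k < (PySem.List.enumerate pl 0).length := by
      rw [PySem.List.length_enumerate]; exact hk
    have hz : k < (dl.zip pl).length := by rw [List.length_zip]; omega
    rw [List.getElem?_eq_getElem he, List.getElem?_eq_getElem hz]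
    simp [PySem.List.getElem_enumerate, List.getElem_zip, PySem.List.pyGet?_natCast,
      List.getElem?_eq_getElem hkd]
  · have h1 : (PySem.List.enumerate pl 0).length ≤ k := by
      rw [PySem.List.length_enumerate]; omega
    have h2 : (dl.zip pl).length ≤ k := by rw [List.length_zip]; omega
    rw [List.getElem?_eq_none h1, List.getElem?_eq_none h2]
    rfl

-- B's frequency dictionary over the extracted values: lookups are counts, keys are the
-- sentinel followed by the distinct values
theorem pv_dict_getD (vs : List Int) (v : Int) :
    (vs.foldl (fun d x => d.insert x (d.getD x 0 + 1))
        (PySem.Dict.insert PySem.Dict.empty (1000000000 : Int) (0 : Int))).getD v 0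
      = vs.count v := by
  rw [PySem.Dict.getD_foldl_insert_add_one]
  rw [PySem.Dict.getD_insert]
  split_ifs <;> simp [PySem.Dict.getD_empty]

theorem pv_dict_keys (vs : List Int) :
    (vs.foldl (fun d x => d.insert x (d.getD x 0 + 1))
        (PySem.Dict.insert PySem.Dict.empty (1000000000 : Int) (0 : Int))).keys
      = PySem.Set.update [(1000000000 : Int)] vs := by
  rw [PySem.Dict.keys_foldl_insert]
  congr 1

-- min over the dictionary's keys is the running min over the sentinel and the values
theorem pv_min_keys (vs : List Int) :
    ((PySem.List.min? (PySem.Set.update [(1000000000 : Int)] vs) (fun x => x)).getD 0)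
      = vs.foldl min 1000000000 := by
  have hsent : (1000000000 : Int) ∈ PySem.Set.update [(1000000000 : Int)] vs := by
    rw [PySem.Set.mem_update]; left; simp
  obtain ⟨m, hm⟩ : ∃ m, PySem.List.min? (PySem.Set.update [(1000000000 : Int)] vs) (fun x => x) = some m := by
    cases hc : PySem.List.min? (PySem.Set.update [(1000000000 : Int)] vs) (fun x => x) with
    | none =>
        rw [PySem.List.min?_eq_none_iff] at hc
        rw [hc] at hsent; exact absurd hsent (List.not_mem_nil)
    | some m => exact ⟨m, rfl⟩
  have hmem := PySem.List.min?_mem hm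
  have hismin := PySem.List.min?_isMin hm
  have hfold := PySem.List.foldl_min_le vs (1000000000 : Int)
  have hfoldmem : vs.foldl min 1000000000 ∈ PySem.Set.update [(1000000000 : Int)] vs := by
    rw [PySem.Set.mem_update]
    rcases PySem.List.foldl_min_mem vs (1000000000 : Int) with h | h
    · left; simp [h]
    · right; exact h
  have h1 : m ≤ vs.foldl min 1000000000 := hismin _ hfoldmem
  have h2 : vs.foldl min 1000000000 ≤ m := by
    rw [PySem.Set.mem_update] at hmem
    rcases hmem with h | h
    · simp at h; omega
    · exact hfold.2 _ h
  rw [hm]; simp; omega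

theorem get_smallest_doc_id_py_spec : Claim_equal_get_smallest_doc_id_py := by
  intro dl pl _ hpre
  unfold Spec_get_smallest_doc_id_py get_smallest_doc_id_py get_smallest_doc_id_py_alt
  -- the list of values both loops actually consume
  set vs : List Int :=
    ((dl.zip pl).filter (fun rp => decide (rp.2 < ((rp.1.length : Int))))).map
      (fun rp => (PySem.List.pyGet? rp.1 rp.2).getD 0) with hvs
  -- A's enumerate-and-index loop is the state machine pvStepA over vs
  have hA : (PySem.List.enumerate pl 0).foldl
      (fun st ip =>
        let row := (PySem.List.pyGet? dl ip.1).getD []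
        if ip.2 < (row.length : Int) then
          let doc := (PySem.List.pyGet? row ip.2).getD 0
          if doc < st.1 then (doc, 1)
          else if doc = st.1 then (st.1, st.2 + 1)
          else st
        else st) ((1000000000 : Int), (0 : Int))
      = vs.foldl pvStepA ((1000000000 : Int), (0 : Int)) := by
    rw [hvs, List.foldl_map,
      ← PySem.List.foldl_ite_eq_foldl_filter
        (p := fun rp : List Int × Int => rp.2 < ((rp.1.length : Int))),
      ← pv_extract_eq dl pl hpre.1, List.foldl_map]
    rfl
  -- B's dictionary-building loop is the counting fold over vs
  have hB : (dl.zip pl).foldl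
      (fun d rp =>
        if rp.2 < (rp.1.length : Int) then
          let v := (PySem.List.pyGet? rp.1 rp.2).getD 0
          d.insert v (d.getD v 0 + 1)
        else d)
      (PySem.Dict.insert PySem.Dict.empty (1000000000 : Int) (0 : Int))
      = vs.foldl (fun d x => d.insert x (d.getD x 0 + 1))
          (PySem.Dict.insert PySem.Dict.empty (1000000000 : Int) (0 : Int)) := by
    rw [hvs, List.foldl_map,
      ← PySem.List.foldl_ite_eq_foldl_filter
        (p := fun rp : List Int × Int => rp.2 < ((rp.1.length : Int)))]
  rw [hA, hB, pvStepA_invariant]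
  have hget := pv_dict_getD vs (vs.foldl min 1000000000)
  rw [PySem.Dict.getD_eq_get?_getD] at hget
  show _ = ((PySem.List.min? _ _).getD 0, _)
  rw [pv_dict_keys, pv_min_keys]
  exact Prod.ext rfl (by rw [hget])

-- VERDICT is the theorem above (stated by name per the layout)
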